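-- pv_equiv track=rewrite | github.com/HCIILAB/LAST | model/M2Edatamodule.py | two_dimensionalize_v2
-- ===== SOURCE A (Python) =====
-- def two_dimensionalize_v2(input_list):
--     result_list = []
--     current_sublist = []
--
--     for item in input_list:
--         if item == '\t' or item == '\n':
--             if current_sublist:
--                 result_list.append(current_sublist)
--                 current_sublist = []
--         else:
--             current_sublist.append(item)
--
--     if current_sublist:
--         result_list.append(current_sublist)
--
--     assert len(result_list)<=16
--     for i in range(16-len(result_list)):# for
--         result_list.append([])
--
--     return result_list
-- ===== SOURCE B (Python) =====
-- def two_dimensionalize_v2(input_list):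
--     # two-pointer run scan instead of the flush state machine
--     result_list = []
--     i = 0
--     n = len(input_list)
--     while i < n:
--         if input_list[i] == '\t' or input_list[i] == '\n':
--             i += 1
--         else:
--             j = i
--             while j < n and input_list[j] != '\t' and input_list[j] != '\n':
--                 j += 1
--             result_list.append(input_list[i:j])
--             i = j
--     assert len(result_list) <= 16
--     result_list += [[] for _ in range(16 - len(result_list))]
--     return result_list
-- ===== Notes on version B (the rewrite author's own statement) =====
-- stated objective: alternative
-- what changed: Replaces the element-by-element accumulate/flush state machine with a two-pointer scan that slices out each maximal non-delimiter run directly and pads with a comprehension.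
import Mathlib
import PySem

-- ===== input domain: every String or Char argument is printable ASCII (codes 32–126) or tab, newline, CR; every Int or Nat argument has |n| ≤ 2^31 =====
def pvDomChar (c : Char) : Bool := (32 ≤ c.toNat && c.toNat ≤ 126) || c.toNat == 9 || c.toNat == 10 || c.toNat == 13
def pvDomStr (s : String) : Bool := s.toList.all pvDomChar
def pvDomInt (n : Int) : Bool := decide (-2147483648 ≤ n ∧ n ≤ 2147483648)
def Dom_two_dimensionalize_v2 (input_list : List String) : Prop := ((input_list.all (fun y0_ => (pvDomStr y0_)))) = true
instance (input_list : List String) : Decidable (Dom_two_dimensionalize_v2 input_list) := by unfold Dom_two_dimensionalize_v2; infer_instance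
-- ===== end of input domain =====

-- ===== PORT A =====
-- B reorganises A's accumulate/flush state machine into a two-pointer run scan (alternative decomposition, same cost).
def pvIsDelim (s : String) : Bool := s == "\t" || s == "\n"

def pvALoop : List String → List (List String) → List String → (List (List String)) × List String
  | [], res, cur => (res, cur)
  | x :: xs, res, cur =>
    if pvIsDelim x then
      if cur ≠ [] then pvALoop xs (res ++ [cur]) [] else pvALoop xs res cur
    else pvALoop xs res (cur ++ [x])

def two_dimensionalize_v2 (input_list : List String) : List (List String) :=
  let p := pvALoop input_list [] []
  let res := if p.2 ≠ [] then p.1 ++ [p.2] else p.1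
  res ++ List.replicate (16 - res.length) []

-- ===== PORT B =====
-- the inner j-scan is takeWhile/dropWhile of the non-delimiter run; the slice input_list[i:j] is x :: that run
def pvBSplit : List String → List (List String)
  | [] => []
  | x :: xs =>
    if pvIsDelim x then pvBSplit xs
    else (x :: xs.takeWhile (fun s => !pvIsDelim s)) :: pvBSplit (xs.dropWhile (fun s => !pvIsDelim s))
termination_by l => l.length
decreasing_by
  · simp
  · exact Nat.lt_succ_of_le (List.length_dropWhile_le _ _)

def two_dimensionalize_v2_alt (input_list : List String) : List (List String) :=
  let r := pvBSplit input_list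
  r ++ List.replicate (16 - r.length) []

-- ===== PRECONDITION & SPEC =====
-- counts the maximal non-delimiter runs of the input (a closed-form condition on the input only)
def pvRunCount : Bool → List String → Nat
  | _, [] => 0
  | afterDelim, x :: xs =>
    if x == "\t" || x == "\n" then pvRunCount true xs
    else (if afterDelim then 1 else 0) + pvRunCount false xs

-- Pre_ excludes exactly the inputs with more than 16 runs, on which A's assert raises AssertionError.
def Pre_two_dimensionalize_v2 (input_list : List String) : Prop :=
  pvRunCount true input_list ≤ 16
instance (input_list : List String) : Decidable (Pre_two_dimensionalize_v2 input_list) := by unfold Pre_two_dimensionalize_v2; infer_instance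

def pvWitness_two_dimensionalize_v2 : List String := ["a", "\t", "b", "\n", "\n", "c d"]

def Spec_two_dimensionalize_v2 (input_list : List String) (out : List (List String)) : Prop := out = two_dimensionalize_v2_alt input_list
instance (input_list : List String) (out : List (List String)) : Decidable (Spec_two_dimensionalize_v2 input_list out) := by unfold Spec_two_dimensionalize_v2; infer_instance

-- ===== CLAIM (what is proved, stated in full; the proofs are below) =====
def Claim_equal_two_dimensionalize_v2 : Prop := ∀ (input_list : List String), Dom_two_dimensionalize_v2 input_list → Pre_two_dimensionalize_v2 input_list → Spec_two_dimensionalize_v2 input_list (two_dimensionalize_v2 input_list)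

-- ===== LEMMAS AND PROOFS =====
-- A's final flush of the pending run
def pvFinish (p : List (List String) × List String) : List (List String) :=
  if p.2 ≠ [] then p.1 ++ [p.2] else p.1

-- B's split with a pending (already accumulated, non-flushed) current run in front
def pvPend (cur : List String) (l : List String) : List (List String) :=
  if cur = [] then pvBSplit l
  else (cur ++ l.takeWhile (fun s => !pvIsDelim s)) :: pvBSplit (l.dropWhile (fun s => !pvIsDelim s))

theorem pvBSplit_cons_delim (x : String) (xs : List String) (hd : pvIsDelim x = true) :
    pvBSplit (x :: xs) = pvBSplit xs := by
  rw [pvBSplit]; simp [hd]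

theorem pvBSplit_cons_run (x : String) (xs : List String) (hd : pvIsDelim x = false) :
    pvBSplit (x :: xs) =
      (x :: xs.takeWhile (fun s => !pvIsDelim s)) :: pvBSplit (xs.dropWhile (fun s => !pvIsDelim s)) := by
  rw [pvBSplit]; simp [hd]

theorem pvALoop_pend (l : List String) : ∀ (res : List (List String)) (cur : List String),
    pvFinish (pvALoop l res cur) = res ++ pvPend cur l := by
  induction l with
  | nil =>
    intro res cur
    by_cases h : cur = [] <;> simp [pvALoop, pvFinish, pvPend, pvBSplit, h]
  | cons x xs ih =>
    intro res cur
    by_cases hd : pvIsDelim x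
    · by_cases hc : cur = []
      · rw [show pvALoop (x :: xs) res cur = pvALoop xs res cur by simp [pvALoop, hd, hc]]
        rw [ih]
        simp [pvPend, hc, pvBSplit_cons_delim x xs hd]
      · rw [show pvALoop (x :: xs) res cur = pvALoop xs (res ++ [cur]) [] by simp [pvALoop, hd, hc]]
        rw [ih]
        have hdr : List.dropWhile (fun s => !pvIsDelim s) (x :: xs) = x :: xs :=
          List.dropWhile_cons_of_neg (by simp [hd])
        simp [pvPend, hc]
        exact ⟨hd, by rw [hdr, pvBSplit_cons_delim x xs hd]⟩
    · rw [show pvALoop (x :: xs) res cur = pvALoop xs res (cur ++ [x]) by simp [pvALoop, hd]]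
      rw [ih]
      have hd' : pvIsDelim x = false := by simpa using hd
      by_cases hc : cur = [] <;>
        simp [pvPend, hc, pvBSplit_cons_run x xs hd', hd']

theorem pvSplit_eq (l : List String) : pvFinish (pvALoop l [] []) = pvBSplit l := by
  simpa [pvPend] using pvALoop_pend l [] []

-- ===== VERDICT (by name: the statement is the Claim_ definition above) =====
theorem two_dimensionalize_v2_spec : Claim_equal_two_dimensionalize_v2 := by
  intro input_list _ _
  unfold Spec_two_dimensionalize_v2 two_dimensionalize_v2 two_dimensionalize_v2_alt
  have h := pvSplit_eq input_list
  unfold pvFinish at h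
  simp only [← h]
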